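-- pv_equiv track=rewrite | github.com/nanomsj/25Spring | data structure and algorithm/机考/期末机考/25T6M二叉的水管.py | get_inorder
-- ===== SOURCE A (Python) =====
-- def get_inorder(topo_result, n):
--     # 生成标准完全二叉树的后序编号序列
--     def build_std_postorder(n):
--         post_order = []
--
--         def build(pos):
--             if pos > n:
--                 return
--             build(2 * pos)  # 左子树
--             build(2 * pos + 1)  # 右子树
--             post_order.append(pos)
--
--         build(1)
--         return post_order
--
--     # 生成标准完全二叉树的中序编号序列
--     def build_std_inorder(n):
--         in_order = []
--
--         def build(pos):
--             if pos > n: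
--                 return
--             build(2 * pos)  # 左子树
--             in_order.append(pos)
--             build(2 * pos + 1)  # 右子树
--
--         build(1)
--         return in_order
--
--     # 建立编号到值的映射
--     std_post = build_std_postorder(n)
--     value_map = {pos: val for pos, val in zip(std_post, topo_result)}
--
--     # 获取中序编号序列并转换为值
--     std_in = build_std_inorder(n)
--     return [value_map[pos] for pos in std_in]
-- ===== SOURCE B (Python) =====
-- def get_inorder(topo_result, n):
--     # divide-and-conquer over the post-order slice; no position->value dict
--     def size(pos):
--         # number of tree positions (<= n) in the subtree rooted at pos
--         return 0 if pos > n else 1 + size(2 * pos) + size(2 * pos + 1)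
--
--     def rec(pos, seg):
--         # seg = post-order value slice of the subtree rooted at pos
--         if pos > n:
--             return []
--         ls = size(2 * pos)
--         return (rec(2 * pos, seg[:ls])
--                 + [seg[len(seg) - 1]]
--                 + rec(2 * pos + 1, seg[ls:len(seg) - 1]))
--
--     return rec(1, topo_result[:size(1)])
-- ===== Notes on version B (the rewrite author's own statement) =====
-- stated objective: alternative
-- what changed: B reconstructs the in-order value list by divide-and-conquer directly over the post-order slice of topo_result (subtree size + left-slice/root/right-slice recursion), instead of A's building two full position-traversal lists and a position-to-value dict; Pre_ excludes inputs with fewer than n values, on which A raises KeyError.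
import Mathlib
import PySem

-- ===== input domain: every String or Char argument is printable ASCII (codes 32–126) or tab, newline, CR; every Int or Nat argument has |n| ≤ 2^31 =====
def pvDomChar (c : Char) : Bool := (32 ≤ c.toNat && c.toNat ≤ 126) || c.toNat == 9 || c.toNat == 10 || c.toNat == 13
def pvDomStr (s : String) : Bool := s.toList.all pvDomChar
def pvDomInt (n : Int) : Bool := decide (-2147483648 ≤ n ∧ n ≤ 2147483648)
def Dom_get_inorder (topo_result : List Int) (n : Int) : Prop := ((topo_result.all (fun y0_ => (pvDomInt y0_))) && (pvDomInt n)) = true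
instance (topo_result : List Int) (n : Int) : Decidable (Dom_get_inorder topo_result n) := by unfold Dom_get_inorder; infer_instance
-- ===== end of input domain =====

-- B rebuilds the in-order value list by divide-and-conquer directly over the post-order
-- slice (subtree sizes + slicing), with no position→value dict and no traversal lists
-- (objective: alternative decomposition, similar cost).
--
-- The `fuel` argument of the recursive helpers is a totality guard only: fuel = n.toNat + 1
-- always exceeds the recursion depth of the Python (positions double each level, and the
-- recursion stops as soon as pos > n), so the 0-fuel branch is never reached.

-- ===== PORT A =====
-- build(pos) of build_std_postorder.
def pvPostBuild (n : Int) : Nat → Nat → List Int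
  | 0, _ => []
  | fuel + 1, pos =>
    if (pos : Int) > n then []
    else pvPostBuild n fuel (2 * pos) ++ pvPostBuild n fuel (2 * pos + 1) ++ [(pos : Int)]

-- build(pos) of build_std_inorder.
def pvInBuild (n : Int) : Nat → Nat → List Int
  | 0, _ => []
  | fuel + 1, pos =>
    if (pos : Int) > n then []
    else pvInBuild n fuel (2 * pos) ++ [(pos : Int)] ++ pvInBuild n fuel (2 * pos + 1)

-- value_map[pos] raises KeyError in Python when pos is missing; ported as get?.getD 0,
-- exact on Pre_ (where every looked-up key is present).
def get_inorder (topo_result : List Int) (n : Int) : List Int :=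
  let std_post := pvPostBuild n (n.toNat + 1) 1
  let value_map := (std_post.zip topo_result).foldl
    (fun d p => d.insert p.1 p.2) (PySem.Dict.empty : PySem.Dict Int Int)
  let std_in := pvInBuild n (n.toNat + 1) 1
  std_in.map (fun pos => (value_map.get? pos).getD 0)

-- ===== PORT B =====
-- size(pos) of Source B.
def pvSize (n : Int) : Nat → Nat → Int
  | 0, _ => 0
  | fuel + 1, pos =>
    if (pos : Int) > n then 0
    else 1 + pvSize n fuel (2 * pos) + pvSize n fuel (2 * pos + 1)

-- rec(pos, seg) of Source B; seg[len(seg)-1] raises IndexError on [] in Python, ported as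
-- pyGet?.getD 0, exact on Pre_ (where seg is nonempty whenever this line runs).
def pvRec (n : Int) : Nat → Nat → List Int → List Int
  | 0, _, _ => []
  | fuel + 1, pos, seg =>
    if (pos : Int) > n then []
    else
      pvRec n fuel (2 * pos) (PySem.List.slice seg none (some (pvSize n fuel (2 * pos)))) ++
        [(PySem.List.pyGet? seg ((seg.length : Int) - 1)).getD 0] ++
        pvRec n fuel (2 * pos + 1)
          (PySem.List.slice seg (some (pvSize n fuel (2 * pos))) (some ((seg.length : Int) - 1)))

def get_inorder_alt (topo_result : List Int) (n : Int) : List Int :=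
  pvRec n (n.toNat + 1) 1
    (PySem.List.slice topo_result none (some (pvSize n (n.toNat + 1) 1)))

-- ===== PRECONDITION & SPEC =====
-- Pre_ excludes exactly the inputs with fewer than n values, on which A raises KeyError
-- (a tree position is then missing from value_map).
def Pre_get_inorder (topo_result : List Int) (n : Int) : Prop :=
  n ≤ (topo_result.length : Int)
instance (topo_result : List Int) (n : Int) : Decidable (Pre_get_inorder topo_result n) := by
  unfold Pre_get_inorder; infer_instance

def pvWitness_get_inorder : List Int × Int := ([10, 20, 30], 3)

def Spec_get_inorder (topo_result : List Int) (n : Int) (out : List Int) : Prop :=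
  out = get_inorder_alt topo_result n
instance (topo_result : List Int) (n : Int) (out : List Int) :
    Decidable (Spec_get_inorder topo_result n out) := by
  unfold Spec_get_inorder; infer_instance

-- ===== CLAIM (what is proved, stated in full; the proofs are below) =====
def Claim_equal_get_inorder : Prop := ∀ (topo_result : List Int) (n : Int), Dom_get_inorder topo_result n → Pre_get_inorder topo_result n → Spec_get_inorder topo_result n (get_inorder topo_result n)

-- ===== LEMMAS AND PROOFS =====

-- pvSize is the length of the corresponding post-order block (same fuel on both sides).
theorem pvSize_eq_length (n : Int) (fuel : Nat) : ∀ pos : Nat,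
    pvSize n fuel pos = ((pvPostBuild n fuel pos).length : Int) := by
  induction fuel with
  | zero => intro pos; simp [pvSize, pvPostBuild]
  | succ fuel ih =>
    intro pos
    rw [pvSize, pvPostBuild]
    split_ifs with h
    · simp
    · rw [ih (2 * pos), ih (2 * pos + 1)]
      simp; ring

-- Every member of the subtree block at pos lies in the heap interval [pos·2^j, (pos+1)·2^j)
-- for some level j, and is ≤ n.
theorem pvPost_mem (n : Int) (fuel : Nat) : ∀ pos : Nat, 1 ≤ pos → ∀ m : Int,
    m ∈ pvPostBuild n fuel pos →
    (∃ j : Nat, (pos : Int) * 2 ^ j ≤ m ∧ m < ((pos : Int) + 1) * 2 ^ j) ∧ m ≤ n := by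
  induction fuel with
  | zero => intro pos _ m hm; simp [pvPostBuild] at hm
  | succ fuel ih =>
    intro pos hpos m hm
    rw [pvPostBuild] at hm
    split_ifs at hm with h2
    · simp at hm
    · rw [not_lt] at h2
      simp only [List.mem_append, List.mem_singleton] at hm
      have h2pow : ∀ j : Nat, (0:Int) < 2 ^ j := fun j => by positivity
      rcases hm with (hm | hm) | hm
      · obtain ⟨⟨j, hj1, hj2⟩, hn⟩ := ih (2 * pos) (by omega) m hm
        push_cast at hj1 hj2
        have ht := h2pow j
        refine ⟨⟨j + 1, ?_, ?_⟩, hn⟩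
        · have e : (pos : Int) * 2 ^ (j + 1) = 2 * (pos:Int) * 2 ^ j := by ring
          linarith
        · have h1' : (2 * (pos:Int) + 1) * 2 ^ j ≤ (2 * (pos:Int) + 2) * 2 ^ j :=
            mul_le_mul_of_nonneg_right (by linarith) ht.le
          have e : ((pos:Int) + 1) * 2 ^ (j + 1) = (2 * (pos:Int) + 2) * 2 ^ j := by ring
          linarith
      · obtain ⟨⟨j, hj1, hj2⟩, hn⟩ := ih (2 * pos + 1) (by omega) m hm
        push_cast at hj1 hj2
        have ht := h2pow j
        refine ⟨⟨j + 1, ?_, ?_⟩, hn⟩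
        · have h1' : (2 * (pos:Int)) * 2 ^ j ≤ (2 * (pos:Int) + 1) * 2 ^ j :=
            mul_le_mul_of_nonneg_right (by linarith) ht.le
          have e : (pos : Int) * 2 ^ (j + 1) = (2 * (pos:Int)) * 2 ^ j := by ring
          linarith
        · have e : ((pos:Int) + 1) * 2 ^ (j + 1) = (2 * (pos:Int) + 1 + 1) * 2 ^ j := by ring
          linarith
      · subst hm
        exact ⟨⟨0, by simp, by simp⟩, h2⟩

theorem pvPost_lower (n : Int) (fuel pos : Nat) (hpos : 1 ≤ pos) (m : Int)
    (hm : m ∈ pvPostBuild n fuel pos) : (pos : Int) ≤ m := by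
  obtain ⟨⟨j, hj1, _⟩, _⟩ := pvPost_mem n fuel pos hpos m hm
  have h1 : (1:Int) ≤ 2 ^ j := one_le_pow₀ (by norm_num)
  nlinarith [Int.natCast_nonneg pos]

-- The two sibling subtrees are disjoint (their heap intervals never overlap).
theorem pvPost_sibling_disj (n : Int) (fuel p : Nat) (hp : 1 ≤ p) (m : Int)
    (h1 : m ∈ pvPostBuild n fuel (2 * p)) (h2 : m ∈ pvPostBuild n fuel (2 * p + 1)) : False := by
  obtain ⟨⟨j, hj1, hj2⟩, -⟩ := pvPost_mem n fuel (2 * p) (by omega) m h1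
  obtain ⟨⟨k, hk1, hk2⟩, -⟩ := pvPost_mem n fuel (2 * p + 1) (by omega) m h2
  push_cast at hj1 hj2 hk1 hk2
  have hp' : (1:Int) ≤ (p:Int) := by exact_mod_cast hp
  rcases Nat.lt_or_ge k j with hjk | hjk
  · obtain ⟨i, rfl⟩ : ∃ i, j = i + 1 := ⟨j - 1, by omega⟩
    have hpow : (2:Int) ^ k ≤ 2 ^ i := pow_le_pow_right₀ (by norm_num) (by omega)
    have e1 : (2 * (p:Int) + 1 + 1) * 2 ^ k ≤ (2 * (p:Int) + 2) * 2 ^ i := by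
      have := mul_le_mul_of_nonneg_left hpow (show (0:Int) ≤ 2 * (p:Int) + 2 by linarith)
      linarith
    have e2 : (2 * (p:Int) + 2) * 2 ^ i ≤ 2 * (p:Int) * 2 ^ (i + 1) := by
      have e : (2 * (p:Int)) * 2 ^ (i + 1) = (4 * (p:Int)) * 2 ^ i := by ring
      rw [e]
      exact mul_le_mul_of_nonneg_right (by linarith) (by positivity)
    linarith
  · have hpow : (2:Int) ^ j ≤ 2 ^ k := pow_le_pow_right₀ (by norm_num) hjk
    have : (2 * (p:Int) + 1) * 2 ^ j ≤ (2 * (p:Int) + 1) * 2 ^ k :=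
      mul_le_mul_of_nonneg_left hpow (by linarith)
    linarith

theorem pvPost_nodup (n : Int) (fuel : Nat) : ∀ pos : Nat, 1 ≤ pos →
    (pvPostBuild n fuel pos).Nodup := by
  induction fuel with
  | zero => intro pos _; simp [pvPostBuild]
  | succ fuel ih =>
    intro pos hpos
    rw [pvPostBuild]
    split_ifs with h2
    · simp
    · apply List.Nodup.append
      · exact List.Nodup.append (ih (2 * pos) (by omega)) (ih (2 * pos + 1) (by omega))
          (fun a ha hb => pvPost_sibling_disj n fuel pos hpos a ha hb)
      · exact List.nodup_singleton _
      · intro a ha hb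
        rw [List.mem_singleton] at hb; subst hb
        rcases List.mem_append.1 ha with h | h
        · have := pvPost_lower n fuel (2 * pos) (by omega) _ h
          push_cast at this; omega
        · have := pvPost_lower n fuel (2 * pos + 1) (by omega) _ h
          push_cast at this; omega

-- The full post-order position list is a Nodup list inside [1, n], hence of length ≤ n.
theorem pvPost_length_le (n : Int) (fuel : Nat) :
    (pvPostBuild n fuel 1).length ≤ n.toNat := by
  have hnd := pvPost_nodup n fuel 1 (le_refl 1)
  have hsub : (pvPostBuild n fuel 1).toFinset ⊆ Finset.Icc 1 n := by
    intro m hm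
    rw [List.mem_toFinset] at hm
    exact Finset.mem_Icc.2 ⟨pvPost_lower n fuel 1 (le_refl 1) m hm,
      (pvPost_mem n fuel 1 (le_refl 1) m hm).2⟩
  calc (pvPostBuild n fuel 1).length = (pvPostBuild n fuel 1).toFinset.card :=
        (List.toFinset_card_of_nodup hnd).symm
    _ ≤ (Finset.Icc 1 n).card := Finset.card_le_card hsub
    _ = (n + 1 - 1).toNat := Int.card_Icc 1 n
    _ = n.toNat := by omega

-- Looking the keys of a Nodup key list back up in the dict built from zip(keys, vals)
-- returns exactly the first |keys| values.
theorem pv_map_lookup_zip (ks vs : List Int) (hnd : ks.Nodup) (hlen : ks.length ≤ vs.length) :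
    ks.map (fun k =>
      (((ks.zip vs).foldl (fun d p => d.insert p.1 p.2)
        (PySem.Dict.empty : PySem.Dict Int Int)).get? k).getD 0) = vs.take ks.length := by
  have hfst : (ks.zip vs).map Prod.fst = ks := List.map_fst_zip hlen
  have hitems : (((ks.zip vs).foldl (fun d p => d.insert p.1 p.2)
      (PySem.Dict.empty : PySem.Dict Int Int))).items = ks.zip vs := by
    have h := PySem.Dict.items_foldl_insert_fresh (ks.zip vs) Prod.fst Prod.snd
      PySem.Dict.empty (by intro a _; simp [PySem.Dict.contains_empty]) (by rw [hfst]; exact hnd)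
    simpa using h
  have hkeys : (((ks.zip vs).foldl (fun d p => d.insert p.1 p.2)
      (PySem.Dict.empty : PySem.Dict Int Int))).keys.Nodup := by
    show ((((ks.zip vs).foldl (fun d p => d.insert p.1 p.2)
      (PySem.Dict.empty : PySem.Dict Int Int))).items.map Prod.fst).Nodup
    rw [hitems, hfst]; exact hnd
  apply List.ext_getElem
  · simp [hlen]
  · intro i hi hi2
    have hik : i < ks.length := by simpa using hi
    have hiz : i < (ks.zip vs).length := by simp; omega
    have hget : (((ks.zip vs).foldl (fun d p => d.insert p.1 p.2)
        (PySem.Dict.empty : PySem.Dict Int Int))).get? ks[i] = some vs[i] := by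
      apply PySem.Dict.get?_of_mem_items _ _ hkeys
      · rw [hitems]
        have : (ks.zip vs)[i] = (ks[i], vs[i]) := List.getElem_zip
        exact this ▸ List.getElem_mem hiz
    simp [hget]

-- Main divide-and-conquer invariant: on the f-image of the post-order block of any
-- subtree, pvRec produces the f-image of that subtree's in-order block (same fuel).
theorem pvRec_post (n : Int) (f : Int → Int) (fuel : Nat) : ∀ pos : Nat,
    pvRec n fuel pos ((pvPostBuild n fuel pos).map f) = (pvInBuild n fuel pos).map f := by
  induction fuel with
  | zero => intro pos; simp [pvRec, pvInBuild]
  | succ fuel ih =>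
    intro pos
    rw [pvRec]
    split_ifs with h2
    · rw [pvInBuild, if_pos h2]; simp
    · have hP : pvPostBuild n (fuel + 1) pos =
          pvPostBuild n fuel (2 * pos) ++ pvPostBuild n fuel (2 * pos + 1) ++ [(pos : Int)] := by
        rw [pvPostBuild, if_neg h2]
      have hI : pvInBuild n (fuel + 1) pos =
          pvInBuild n fuel (2 * pos) ++ [(pos : Int)] ++ pvInBuild n fuel (2 * pos + 1) := by
        rw [pvInBuild, if_neg h2]
      have hls : pvSize n fuel (2 * pos) = ((pvPostBuild n fuel (2 * pos)).length : Int) :=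
        pvSize_eq_length n fuel (2 * pos)
      have hlm : ((pvPostBuild n fuel (2 * pos)).map f).length
          = (pvPostBuild n fuel (2 * pos)).length := List.length_map ..
      have hseg : (pvPostBuild n (fuel + 1) pos).map f =
          ((pvPostBuild n fuel (2 * pos)).map f ++ (pvPostBuild n fuel (2 * pos + 1)).map f)
            ++ [f (pos : Int)] := by
        rw [hP]; simp
      have s1 : PySem.List.slice ((pvPostBuild n (fuel + 1) pos).map f) none
          (some (pvSize n fuel (2 * pos))) = (pvPostBuild n fuel (2 * pos)).map f := by
        rw [hseg, hls, PySem.List.slice_to_natCast]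
        rw [List.take_append, List.take_append]
        simp
      have slen : (((pvPostBuild n (fuel + 1) pos).map f).length : Int) - 1 =
          (((pvPostBuild n fuel (2 * pos)).length
            + (pvPostBuild n fuel (2 * pos + 1)).length : Nat) : Int) := by
        rw [hseg]; simp; ring
      have smid : PySem.List.pyGet? ((pvPostBuild n (fuel + 1) pos).map f)
          ((((pvPostBuild n (fuel + 1) pos).map f).length : Int) - 1) = some (f (pos : Int)) := by
        rw [slen, hseg]
        have : ((pvPostBuild n fuel (2 * pos)).length
            + (pvPostBuild n fuel (2 * pos + 1)).length : Nat) =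
            ((pvPostBuild n fuel (2 * pos)).map f
              ++ (pvPostBuild n fuel (2 * pos + 1)).map f).length := by
          simp
        rw [this]
        exact PySem.List.pyGet?_append_length _ [] _
      have s2 : PySem.List.slice ((pvPostBuild n (fuel + 1) pos).map f)
          (some (pvSize n fuel (2 * pos)))
          (some ((((pvPostBuild n (fuel + 1) pos).map f).length : Int) - 1))
          = (pvPostBuild n fuel (2 * pos + 1)).map f := by
        rw [slen, hls, PySem.List.slice_natCast, hseg]
        rw [List.drop_append, List.drop_append, List.take_append]
        rw [← hlm, List.drop_length]
        simp
      rw [s1, smid, s2, ih (2 * pos), ih (2 * pos + 1), hI]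
      simp

-- ===== VERDICT (by name: the statement is the Claim_ definition above) =====
theorem get_inorder_spec : Claim_equal_get_inorder := by
  intro topo n _ hpre
  unfold Spec_get_inorder get_inorder get_inorder_alt
  have hlen : (pvPostBuild n (n.toNat + 1) 1).length ≤ topo.length := by
    have h1 := pvPost_length_le n (n.toNat + 1)
    unfold Pre_get_inorder at hpre
    omega
  have hmap := pv_map_lookup_zip (pvPostBuild n (n.toNat + 1) 1) topo
    (pvPost_nodup n (n.toNat + 1) 1 (le_refl 1)) hlen
  rw [pvSize_eq_length n (n.toNat + 1) 1, PySem.List.slice_to_natCast, ← hmap,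
    pvRec_post n _ (n.toNat + 1) 1]
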